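-- pv_equiv track=rewrite | github.com/chrisroubideaux/fitness-app | backend/chats/routes.py | detect_spam_or_prompt_injection
-- ===== SOURCE A (Python) =====
-- def detect_spam_or_prompt_injection(text: str) -> bool:
--     """Simple spam and prompt injection detection."""
--     spam_keywords = [
--         "buy now",
--         "click here",
--         "free money",
--         "subscribe",
--         "lottery",
--         "credit card",
--         "http",
--         "bit.ly",
--         "promo",
--         "winner",
--     ]
--     injections = [
--         "ignore previous instructions",
--         "system prompt",
--         "jailbreak",
--         "bypass",
--         "disregard the rules",
--         "prompt injection",
--         "act as",
--     ]
--     lower = text.lower()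
--     return any(kw in lower for kw in spam_keywords + injections)
-- ===== SOURCE B (Python) =====
-- def detect_spam_or_prompt_injection(text: str) -> bool:
--     """Simple spam and prompt injection detection (position-major scan)."""
--     keywords = [
--         "buy now",
--         "click here",
--         "free money",
--         "subscribe",
--         "lottery",
--         "credit card",
--         "http",
--         "bit.ly",
--         "promo",
--         "winner",
--         "ignore previous instructions",
--         "system prompt",
--         "jailbreak",
--         "bypass",
--         "disregard the rules",
--         "prompt injection",
--         "act as",
--     ]
--     lower = text.lower()
--     for i in range(len(lower)):
--         for kw in keywords:
--             if lower.startswith(kw, i):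
--                 return True
--     return False
-- ===== Notes on version B (the rewrite author's own statement) =====
-- stated objective: alternative
-- what changed: B scans the lowercased text position by position, testing at each position whether any keyword starts there (a single left-to-right pass with prefix tests), instead of A's keyword-major loop that runs a separate full substring search per keyword.
import Mathlib
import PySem

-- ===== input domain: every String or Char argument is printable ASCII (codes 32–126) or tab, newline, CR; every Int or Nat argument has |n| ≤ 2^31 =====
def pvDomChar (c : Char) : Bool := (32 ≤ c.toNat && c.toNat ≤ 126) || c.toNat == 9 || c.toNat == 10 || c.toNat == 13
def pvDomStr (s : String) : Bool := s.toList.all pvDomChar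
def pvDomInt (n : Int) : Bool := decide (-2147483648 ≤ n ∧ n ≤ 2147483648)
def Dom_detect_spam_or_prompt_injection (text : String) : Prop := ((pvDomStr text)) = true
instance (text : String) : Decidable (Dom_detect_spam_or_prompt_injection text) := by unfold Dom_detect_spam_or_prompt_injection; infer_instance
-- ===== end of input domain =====

-- B replaces A's keyword-major loop of substring searches by a single position-major scan
-- with per-position prefix tests (objective: alternative).


-- ===== PORT A =====
def pvSpamKeywords : List String :=
  ["buy now", "click here", "free money", "subscribe", "lottery",
   "credit card", "http", "bit.ly", "promo", "winner"]

def pvInjections : List String :=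
  ["ignore previous instructions", "system prompt", "jailbreak", "bypass",
   "disregard the rules", "prompt injection", "act as"]

def detect_spam_or_prompt_injection (text : String) : Bool :=
  let lower := PySem.Str.lower text
  (pvSpamKeywords ++ pvInjections).any (fun kw => PySem.Str.isIn kw lower)

-- ===== PORT B =====
def pvKeywordsB : List (List Char) :=
  (["buy now", "click here", "free money", "subscribe", "lottery",
    "credit card", "http", "bit.ly", "promo", "winner",
    "ignore previous instructions", "system prompt", "jailbreak", "bypass",
    "disregard the rules", "prompt injection", "act as"] : List String).map String.toList

-- the position loop: at each position (suffix) test every keyword as a prefix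
def pvScan (kws : List (List Char)) : List Char → Bool
  | [] => false
  | c :: rest =>
      if kws.any (fun kw => PySem.Chars.startswith (c :: rest) kw) then true
      else pvScan kws rest

def detect_spam_or_prompt_injection_alt (text : String) : Bool :=
  let lower := PySem.Str.lower text
  pvScan pvKeywordsB lower.toList

-- ===== PRECONDITION & SPEC =====
def Spec_detect_spam_or_prompt_injection (text : String) (out : Bool) : Prop := out = detect_spam_or_prompt_injection_alt text
instance (text : String) (out : Bool) : Decidable (Spec_detect_spam_or_prompt_injection text out) := by unfold Spec_detect_spam_or_prompt_injection; infer_instance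

-- ===== CLAIM (what is proved, stated in full; the proofs are below) =====
def Claim_equal_detect_spam_or_prompt_injection : Prop := ∀ (text : String), Dom_detect_spam_or_prompt_injection text → Spec_detect_spam_or_prompt_injection text (detect_spam_or_prompt_injection text)

-- ===== LEMMAS AND PROOFS =====

-- the position-major scan finds exactly the keywords occurring as an infix,
-- provided no keyword is empty
theorem pvScan_iff (kws : List (List Char)) (h : ∀ kw ∈ kws, kw ≠ []) :
    ∀ cs : List Char, (pvScan kws cs = true ↔ ∃ kw ∈ kws, kw <:+: cs) := by
  intro cs
  induction cs with
  | nil =>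
    simp only [pvScan]
    constructor
    · intro hf; cases hf
    · rintro ⟨kw, hm, hinf⟩
      exact absurd (List.eq_nil_of_infix_nil hinf) (h kw hm)
  | cons c rest ih =>
    simp only [pvScan]
    split_ifs with hany
    · simp only [true_iff]
      simp only [List.any_eq_true] at hany
      obtain ⟨kw, hm, hsw⟩ := hany
      exact ⟨kw, hm, (PySem.Chars.startswith_iff _ _ |>.mp hsw).isInfix⟩
    · rw [ih]
      simp only [List.any_eq_true] at hany
      push Not at hany
      constructor
      · rintro ⟨kw, hm, hinf⟩
        exact ⟨kw, hm, List.infix_cons_iff.mpr (Or.inr hinf)⟩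
      · rintro ⟨kw, hm, hinf⟩
        rcases List.infix_cons_iff.mp hinf with hpre | hinf'
        · exact absurd ((PySem.Chars.startswith_iff _ _).mpr hpre) (by simpa using hany kw hm)
        · exact ⟨kw, hm, hinf'⟩

-- B's keyword list is A's two lists concatenated, viewed as char lists
theorem pvKeywordsB_eq : pvKeywordsB = (pvSpamKeywords ++ pvInjections).map String.toList := by
  decide

-- ===== VERDICT (by name: the statement is the Claim_ definition above) =====
theorem detect_spam_or_prompt_injection_spec : Claim_equal_detect_spam_or_prompt_injection := by
  intro text _
  unfold Spec_detect_spam_or_prompt_injection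
  unfold detect_spam_or_prompt_injection detect_spam_or_prompt_injection_alt
  rw [Bool.eq_iff_iff]
  rw [pvScan_iff _ (by decide)]
  simp only [List.any_eq_true, PySem.Str.isIn_iff_infix]
  rw [pvKeywordsB_eq]
  simp only [List.mem_map]
  constructor
  · rintro ⟨kw, hm, hinf⟩
    exact ⟨kw.toList, ⟨kw, hm, rfl⟩, hinf⟩
  · rintro ⟨_, ⟨s, hs, rfl⟩, hinf⟩
    exact ⟨s, hs, hinf⟩
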